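-- pv_equiv track=rewrite | github.com/DarkCarnages/Simulation_Of_Encoding_And_Decoding | Simulation 1/encoding.py | mlt3_encode
-- ===== SOURCE A (Python) =====
-- def mlt3_encode(bitstream):
--     levels = [0, 1, 0, -1]
--     state_idx = 0
--     signal = []
--     for bit in bitstream:
--         if bit == 1:
--             state_idx = (state_idx + 1) % 4
--             signal.append(levels[state_idx])
--         else:
--             signal.append(levels[state_idx])
--     return signal
-- ===== SOURCE B (Python) =====
-- def mlt3_encode(bitstream):
--     # Classic MLT-3 transition coder: track the current level and the
--     # polarity of the last nonzero level; no level table, no mod-4 index.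
--     level = 0
--     last_nonzero = -1  # so the first excursion from 0 goes to +1
--     out = []
--     for bit in bitstream:
--         if bit == 1:
--             if level != 0:
--                 last_nonzero = level
--                 level = 0
--             else:
--                 level = -last_nonzero
--         out.append(level)
--     return out
-- ===== Notes on version B (the rewrite author's own statement) =====
-- stated objective: alternative
-- what changed: Replaces A's mod-4 index into a four-entry level table by the classic MLT-3 transition state machine that keeps the current level and the polarity of the last nonzero level, toggling between zero and the negated last polarity on each 1.
import Mathlib
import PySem

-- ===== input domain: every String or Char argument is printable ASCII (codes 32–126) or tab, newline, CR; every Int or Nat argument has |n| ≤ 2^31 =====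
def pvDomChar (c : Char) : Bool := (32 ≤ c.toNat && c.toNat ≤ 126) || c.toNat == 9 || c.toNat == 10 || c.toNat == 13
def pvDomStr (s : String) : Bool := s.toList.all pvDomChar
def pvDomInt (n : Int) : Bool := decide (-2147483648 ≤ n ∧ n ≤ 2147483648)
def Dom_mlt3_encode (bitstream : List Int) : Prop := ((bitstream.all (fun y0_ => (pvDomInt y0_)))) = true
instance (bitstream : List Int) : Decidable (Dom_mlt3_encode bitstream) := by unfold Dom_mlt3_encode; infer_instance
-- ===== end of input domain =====

-- ===== PORT A =====
-- literal port of A: one loop carrying state_idx, appending levels[state_idx]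
def mlt3A_loop (levels : List Int) : Int → List Int → List Int
  | _, [] => []
  | state_idx, bit :: rest =>
    if bit == 1 then
      let s' := PySem.Int.mod (state_idx + 1) 4
      ((PySem.List.pyGet? levels s').getD 0) :: mlt3A_loop levels s' rest
    else
      ((PySem.List.pyGet? levels state_idx).getD 0) :: mlt3A_loop levels state_idx rest

def mlt3_encode (bitstream : List Int) : List Int :=
  mlt3A_loop [0, 1, 0, -1] 0 bitstream

-- ===== PORT B =====
-- port of Source B: transition state machine over (level, last_nonzero); no table, no mod
def mlt3B_loop : Int → Int → List Int → List Int
  | _, _, [] => []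
  | level, last_nonzero, bit :: rest =>
    if bit == 1 then
      if level != 0 then
        0 :: mlt3B_loop 0 level rest
      else
        (-last_nonzero) :: mlt3B_loop (-last_nonzero) last_nonzero rest
    else
      level :: mlt3B_loop level last_nonzero rest

def mlt3_encode_alt (bitstream : List Int) : List Int :=
  mlt3B_loop 0 (-1) bitstream

-- ===== PRECONDITION & SPEC =====
def Spec_mlt3_encode (bitstream : List Int) (out : List Int) : Prop := out = mlt3_encode_alt bitstream
instance (bitstream : List Int) (out : List Int) : Decidable (Spec_mlt3_encode bitstream out) := by unfold Spec_mlt3_encode; infer_instance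

-- ===== CLAIM (what is proved, stated in full; the proofs are below) =====
def Claim_equal_mlt3_encode : Prop := ∀ (bitstream : List Int), Dom_mlt3_encode bitstream → Spec_mlt3_encode bitstream (mlt3_encode bitstream)

-- ===== LEMMAS AND PROOFS =====

-- A's table index idx ∈ {0,1,2,3} corresponds to B's state (level, last_nonzero):
-- 0 ↦ (0,-1), 1 ↦ (1,-1), 2 ↦ (0,1), 3 ↦ (-1,1).
theorem mlt3_loop_eq (bs : List Int) :
    ∀ idx : Int, (idx = 0 ∨ idx = 1 ∨ idx = 2 ∨ idx = 3) →
      mlt3A_loop [0, 1, 0, -1] idx bs =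
        mlt3B_loop (if idx = 1 then 1 else if idx = 3 then -1 else 0)
          (if idx = 0 ∨ idx = 1 then -1 else 1) bs := by
  induction bs with
  | nil => intro idx _; simp [mlt3A_loop, mlt3B_loop]
  | cons b rest ih =>
    intro idx hidx
    by_cases hb : b = 1 <;>
      rcases hidx with h | h | h | h <;> subst h <;>
        simp [mlt3A_loop, mlt3B_loop, hb, PySem.Int.mod, PySem.List.pyGet?,
          PySem.List.pyIdx?, ih 0, ih 1, ih 2, ih 3]

-- ===== VERDICT (by name: the statement is the Claim_ definition above) =====
theorem mlt3_encode_spec : Claim_equal_mlt3_encode := by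
  intro bitstream _
  unfold Spec_mlt3_encode mlt3_encode mlt3_encode_alt
  simpa using mlt3_loop_eq bitstream 0 (Or.inl rfl)
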